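-- pv_equiv track=rewrite | github.com/TomHolidayUK/AdventOfCode-2024 | Day21/day21.py | numerical_to_directional
-- ===== SOURCE A (Python) =====
-- numerical = {
--     "0": [1, 0],
--     "1": [0, 1],
--     "2": [1, 1],
--     "3": [2, 1],
--     "4": [0, 2],
--     "5": [1, 2],
--     "6": [2, 2],
--     "7": [0, 3],
--     "8": [1, 3],
--     "9": [2, 3],
--     "A": [2, 0]
-- }
--
-- def numerical_move(start, end):
--     position = start.copy()
--     directions = ""
--     while position != end:
--         if position[1] < end[1]:
--             position[1] += 1
--             directions += "^"
--             continue
--         if position[0] < end[0]: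
--             position[0] += 1
--             directions += ">"
--             continue
--         if position[1] > end[1]:
--             position[1] -= 1
--             directions += "v"
--             continue
--         if position[0] > end[0]:
--             position[0] -= 1
--             directions += "<"
--             continue
--     return directions
--
-- def numerical_to_directional(chars):
--     position = numerical["A"]
--     output = ""
--     for char in chars:
--         output += numerical_move(position, numerical[char])
--         output += "A"
--         position = numerical[char]
--
--     return output
-- ===== SOURCE B (Python) =====
-- numerical = {
--     "0": [1, 0],
--     "1": [0, 1],
--     "2": [1, 1],
--     "3": [2, 1],
--     "4": [0, 2],
--     "5": [1, 2],
--     "6": [2, 2],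
--     "7": [0, 3],
--     "8": [1, 3],
--     "9": [2, 3],
--     "A": [2, 0]
-- }
--
-- def numerical_to_directional(chars):
--     pts = [numerical[c] for c in chars]
--     x, y = numerical["A"]
--     out = []
--     for ex, ey in pts:
--         dx, dy = ex - x, ey - y
--         out.append('^' * dy + '>' * dx + 'v' * -dy + '<' * -dx + 'A')
--         x, y = ex, ey
--     return ''.join(out)
-- ===== Notes on version B (the rewrite author's own statement) =====
-- stated objective: simpler
-- what changed: The per-key while-loop that walks one step at a time is replaced by a closed form: each segment is '^'*dy + '>'*dx + 'v'*-dy + '<'*-dx + 'A' computed directly from the coordinate deltas, joined over the key list.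
import Mathlib
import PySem

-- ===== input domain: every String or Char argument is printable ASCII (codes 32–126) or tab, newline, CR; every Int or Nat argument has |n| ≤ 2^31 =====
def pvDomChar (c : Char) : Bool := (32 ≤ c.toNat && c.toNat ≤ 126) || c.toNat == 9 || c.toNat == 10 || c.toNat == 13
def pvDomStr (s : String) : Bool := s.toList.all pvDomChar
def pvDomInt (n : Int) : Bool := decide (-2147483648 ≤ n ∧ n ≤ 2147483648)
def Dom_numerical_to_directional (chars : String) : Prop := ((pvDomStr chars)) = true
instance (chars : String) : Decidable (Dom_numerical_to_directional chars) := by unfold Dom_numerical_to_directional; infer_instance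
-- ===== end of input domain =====

-- B replaces A's step-by-step while-loop per key with a closed-form pvSeg built from the coordinate deltas (simpler).

-- ===== PORT A =====
-- the module-level `numerical` dict as a lookup (none = KeyError, excluded by Pre_)
def numpad (c : Char) : Option (Int × Int) :=
  if c = '0' then some (1, 0)
  else if c = '1' then some (0, 1)
  else if c = '2' then some (1, 1)
  else if c = '3' then some (2, 1)
  else if c = '4' then some (0, 2)
  else if c = '5' then some (1, 2)
  else if c = '6' then some (2, 2)
  else if c = '7' then some (0, 3)
  else if c = '8' then some (1, 3)
  else if c = '9' then some (2, 3)
  else if c = 'A' then some (2, 0)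
  else none

-- numerical_move: the while-loop, one step per recursive call, branches in A's order
def numerical_move (px py ex ey : Int) : List Char :=
  if (px, py) = (ex, ey) then []
  else if py < ey then '^' :: numerical_move px (py + 1) ex ey
  else if px < ex then '>' :: numerical_move (px + 1) py ex ey
  else if py > ey then 'v' :: numerical_move px (py - 1) ex ey
  else if px > ex then '<' :: numerical_move (px - 1) py ex ey
  else []
termination_by ((ex - px).natAbs + (ey - py).natAbs)
decreasing_by all_goals omega

def numericalToDirectionalGo (x y : Int) : List Char → List Char
  | [] => []
  | c :: rest =>
    let p := (numpad c).getD (0, 0)   -- KeyError case excluded by Pre_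
    numerical_move x y p.1 p.2 ++ ['A'] ++ numericalToDirectionalGo p.1 p.2 rest

def numerical_to_directional (chars : String) : String :=
  String.ofList (numericalToDirectionalGo 2 0 chars.toList)

-- ===== PORT B =====
-- closed-form pvSeg for one key: '^'*dy + '>'*dx + 'v'*(-dy) + '<'*(-dx) + 'A'
def pvSeg (x y ex ey : Int) : List Char :=
  List.replicate (ey - y).toNat '^' ++ List.replicate (ex - x).toNat '>' ++
  List.replicate (y - ey).toNat 'v' ++ List.replicate (x - ex).toNat '<' ++ ['A']

def altGo (x y : Int) : List (Int × Int) → List Char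
  | [] => []
  | p :: rest => pvSeg x y p.1 p.2 ++ altGo p.1 p.2 rest

def numerical_to_directional_alt (chars : String) : String :=
  String.ofList (altGo 2 0 (chars.toList.map (fun c => (numpad c).getD (0, 0))))

-- ===== PRECONDITION & SPEC =====
-- Pre_: every character is a key of the numerical dict; A raises KeyError otherwise.
def Pre_numerical_to_directional (chars : String) : Prop :=
  chars.toList.all (fun c => (numpad c).isSome) = true
instance (chars : String) : Decidable (Pre_numerical_to_directional chars) := by
  unfold Pre_numerical_to_directional; infer_instance

def pvWitness_numerical_to_directional : String := ""

def Spec_numerical_to_directional (chars : String) (out : String) : Prop := out = numerical_to_directional_alt chars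
instance (chars : String) (out : String) : Decidable (Spec_numerical_to_directional chars out) := by unfold Spec_numerical_to_directional; infer_instance

-- ===== CLAIM (what is proved, stated in full; the proofs are below) =====
def Claim_equal_numerical_to_directional : Prop := ∀ (chars : String), Dom_numerical_to_directional chars → Pre_numerical_to_directional chars → Spec_numerical_to_directional chars (numerical_to_directional chars)

-- ===== LEMMAS AND PROOFS =====

-- the while-loop emits exactly the closed-form runs in ^ > v < order
theorem numerical_move_eq (px py ex ey : Int) :
    numerical_move px py ex ey =
      List.replicate (ey - py).toNat '^' ++ List.replicate (ex - px).toNat '>' ++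
      List.replicate (py - ey).toNat 'v' ++ List.replicate (px - ex).toNat '<' := by
  fun_induction numerical_move px py ex ey with
  | case1 px py h =>
    simp only [Prod.mk.injEq] at h
    simp [h.1, h.2]
  | case2 px py h1 h2 ih =>
    have e : (ey - py).toNat = (ey - (py + 1)).toNat + 1 := by omega
    have f : (py + 1 - ey).toNat = (py - ey).toNat := by omega
    rw [ih, e, f, List.replicate_succ]
    simp
  | case3 px py h1 h2 h3 ih =>
    have e0 : (ey - py).toNat = 0 := by omega
    have e : (ex - px).toNat = (ex - (px + 1)).toNat + 1 := by omega
    have f : (px + 1 - ex).toNat = (px - ex).toNat := by omega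
    rw [ih, e0, e, f, List.replicate_succ]
    simp
  | case4 px py h1 h2 h3 h4 ih =>
    have e0 : (ey - py).toNat = 0 := by omega
    have e1 : (ex - px).toNat = 0 := by omega
    have e : (py - ey).toNat = (py - 1 - ey).toNat + 1 := by omega
    have f : (ey - (py - 1)).toNat = 0 := by omega
    rw [ih, e0, e1, e, f, List.replicate_succ]
    simp
  | case5 px py h1 h2 h3 h4 h5 ih =>
    have e0 : (ey - py).toNat = 0 := by omega
    have e1 : (ex - px).toNat = 0 := by omega
    have e2 : (py - ey).toNat = 0 := by omega
    have e : (px - ex).toNat = (px - 1 - ex).toNat + 1 := by omega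
    have f : (ex - (px - 1)).toNat = 0 := by omega
    rw [ih, e0, e1, e2, e, f, List.replicate_succ]
    simp
  | case6 px py h1 h2 h3 h4 h5 =>
    have hx : px = ex := by omega
    have hy : py = ey := by omega
    simp [hx, hy]

theorem go_eq (l : List Char) : ∀ (x y : Int),
    numericalToDirectionalGo x y l = altGo x y (l.map (fun c => (numpad c).getD (0, 0))) := by
  induction l with
  | nil => intro x y; rfl
  | cons c rest ih =>
    intro x y
    simp only [numericalToDirectionalGo, List.map_cons, altGo, pvSeg, numerical_move_eq, ih,
      List.append_assoc]


-- ===== VERDICT (by name: the statement is the Claim_ definition above) =====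
theorem numerical_to_directional_spec : Claim_equal_numerical_to_directional := by
  intro chars _ _
  unfold Spec_numerical_to_directional numerical_to_directional numerical_to_directional_alt
  rw [go_eq]
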